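-- pv_equiv track=rewrite | github.com/pypi-data/pypi-mirror-400 | packages/hecstac/hecstac-0.5.3.tar.gz/hecstac-0.5.3/hecstac/hms/utils.py | insert_after_key
-- ===== SOURCE A (Python) =====
-- from collections import OrderedDict
--
-- def insert_after_key(dic: dict, insert_key: str, new_key: str, new_val: str) -> OrderedDict:
--     """Recreate the dictionary to insert key-val after the occurance of the insert_key if key-val doesn't exist yet in the dictionary."""
--     new_dic = {}
--     for key, val in dic.items():
--         if key == new_key:
--             continue
--         new_dic[key] = val
--         if key == insert_key:
--             new_dic[new_key] = new_val
--     return OrderedDict(new_dic)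
-- ===== SOURCE B (Python) =====
-- from collections import OrderedDict
--
-- def insert_after_key(dic: dict, insert_key: str, new_key: str, new_val: str) -> OrderedDict:
--     """Filter out new_key, then splice (new_key, new_val) right after insert_key's position."""
--     items = [(k, v) for k, v in dic.items() if k != new_key]
--     keys = [k for k, _ in items]
--     if insert_key in keys:
--         idx = keys.index(insert_key)
--         items.insert(idx + 1, (new_key, new_val))
--     return OrderedDict(items)
-- ===== Notes on version B (the rewrite author's own statement) =====
-- stated objective: simpler
-- what changed: Instead of deciding insertion element-by-element inside a copy loop over the dict, B filters out new_key once, finds insert_key's position with a single index lookup, splices the new pair there, and wraps the list in OrderedDict.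
import Mathlib
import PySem

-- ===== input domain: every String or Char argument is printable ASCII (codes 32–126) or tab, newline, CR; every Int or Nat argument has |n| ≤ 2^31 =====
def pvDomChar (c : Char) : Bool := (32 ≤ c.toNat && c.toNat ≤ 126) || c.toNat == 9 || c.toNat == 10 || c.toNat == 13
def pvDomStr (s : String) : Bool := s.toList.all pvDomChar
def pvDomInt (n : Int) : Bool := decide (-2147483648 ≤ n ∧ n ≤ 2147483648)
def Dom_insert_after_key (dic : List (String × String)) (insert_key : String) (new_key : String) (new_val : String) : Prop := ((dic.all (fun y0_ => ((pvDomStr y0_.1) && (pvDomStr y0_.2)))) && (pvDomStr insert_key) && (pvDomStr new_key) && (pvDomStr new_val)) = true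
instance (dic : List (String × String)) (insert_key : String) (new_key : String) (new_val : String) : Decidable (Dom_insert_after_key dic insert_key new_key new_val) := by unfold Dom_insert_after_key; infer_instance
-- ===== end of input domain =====

-- B replaces A's element-by-element copy loop (with a conditional mid-loop insert) by
-- filter + index lookup + splice; same O(n), objective: simpler decomposition.

-- ===== PORT A =====
def insert_after_key (dic : List (String × String)) (insert_key : String) (new_key : String) (new_val : String) : List (String × String) :=
  (dic.foldl (fun (new_dic : PySem.Dict String String) kv =>
      if kv.1 = new_key then new_dic
      else
        let new_dic := new_dic.insert kv.1 kv.2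
        if kv.1 = insert_key then new_dic.insert new_key new_val else new_dic)
    PySem.Dict.empty).items

-- ===== PORT B =====
def insert_after_key_alt (dic : List (String × String)) (insert_key : String) (new_key : String) (new_val : String) : List (String × String) :=
  let items := dic.filter (fun kv => !(kv.1 = new_key : Bool))
  let keys := items.map Prod.fst
  let items :=
    match PySem.List.index? keys insert_key with
    | some idx => PySem.List.insert items ((idx : Int) + 1) (new_key, new_val)
    | none => items
  (items.foldl (fun (d : PySem.Dict String String) kv => d.insert kv.1 kv.2) PySem.Dict.empty).items

-- ===== PRECONDITION & SPEC =====
-- Pre_: the association list encodes a Python dict, so its keys are pairwise distinct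
-- (the callers can only pass a dict; lists with duplicate keys correspond to no Python call).
def Pre_insert_after_key (dic : List (String × String)) (insert_key : String) (new_key : String) (new_val : String) : Prop :=
  (dic.map Prod.fst).Nodup
instance (dic : List (String × String)) (insert_key : String) (new_key : String) (new_val : String) : Decidable (Pre_insert_after_key dic insert_key new_key new_val) := by unfold Pre_insert_after_key; infer_instance

def pvWitness_insert_after_key : (List (String × String)) × String × String × String :=
  ([("a", "1"), ("b", "2")], "a", "c", "9")

def Spec_insert_after_key (dic : List (String × String)) (insert_key : String) (new_key : String) (new_val : String) (out : List (String × String)) : Prop := out = insert_after_key_alt dic insert_key new_key new_val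
instance (dic : List (String × String)) (insert_key : String) (new_key : String) (new_val : String) (out : List (String × String)) : Decidable (Spec_insert_after_key dic insert_key new_key new_val out) := by unfold Spec_insert_after_key; infer_instance

-- ===== CLAIM (what is proved, stated in full; the proofs are below) =====
def Claim_equal_insert_after_key : Prop := ∀ (dic : List (String × String)) (insert_key : String) (new_key : String) (new_val : String), Dom_insert_after_key dic insert_key new_key new_val → Pre_insert_after_key dic insert_key new_key new_val → Spec_insert_after_key dic insert_key new_key new_val (insert_after_key dic insert_key new_key new_val)

-- ===== LEMMAS AND PROOFS =====

-- the stream of (key, value) pairs A inserts into its dict, in order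
def pvSeq (dic : List (String × String)) (insert_key new_key new_val : String) : List (String × String) :=
  dic.flatMap (fun kv =>
    if kv.1 = new_key then []
    else if kv.1 = insert_key then [kv, (new_key, new_val)]
    else [kv])

theorem pvSeq_cons_nk (kv : String × String) (rest : List (String × String)) (ik nk nv : String)
    (h1 : kv.1 = nk) : pvSeq (kv :: rest) ik nk nv = pvSeq rest ik nk nv := by
  simp [pvSeq, h1]

theorem pvSeq_cons_ik (kv : String × String) (rest : List (String × String)) (ik nk nv : String)
    (h1 : ¬ kv.1 = nk) (h2 : kv.1 = ik) :
    pvSeq (kv :: rest) ik nk nv = kv :: (nk, nv) :: pvSeq rest ik nk nv := by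
  subst h2; simp [pvSeq, h1]

theorem pvSeq_cons_other (kv : String × String) (rest : List (String × String)) (ik nk nv : String)
    (h1 : ¬ kv.1 = nk) (h2 : ¬ kv.1 = ik) :
    pvSeq (kv :: rest) ik nk nv = kv :: pvSeq rest ik nk nv := by
  simp [pvSeq, h1, h2]

-- A's fold is the plain insert-fold over pvSeq
theorem pvFoldA (dic : List (String × String)) (ik nk nv : String) (d : PySem.Dict String String) :
    dic.foldl (fun (new_dic : PySem.Dict String String) kv =>
      if kv.1 = nk then new_dic
      else
        let new_dic := new_dic.insert kv.1 kv.2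
        if kv.1 = ik then new_dic.insert nk nv else new_dic) d
    = (pvSeq dic ik nk nv).foldl (fun d kv => d.insert kv.1 kv.2) d := by
  induction dic generalizing d with
  | nil => rfl
  | cons kv rest ih =>
    by_cases h1 : kv.1 = nk
    · rw [List.foldl_cons, pvSeq_cons_nk kv rest ik nk nv h1]
      simp only [if_pos h1]
      exact ih d
    · by_cases h2 : kv.1 = ik
      · rw [List.foldl_cons, pvSeq_cons_ik kv rest ik nk nv h1 h2,
          List.foldl_cons, List.foldl_cons]
        simp only [if_neg h1, if_pos h2]
        exact ih _
      · rw [List.foldl_cons, pvSeq_cons_other kv rest ik nk nv h1 h2, List.foldl_cons]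
        simp only [if_neg h1, if_neg h2]
        exact ih _

-- when insert_key does not occur among the surviving keys, pvSeq is just the filter
theorem pvSeq_no_ik (l : List (String × String)) (ik nk nv : String)
    (h : ik ∉ (l.filter (fun kv => !(kv.1 = nk : Bool))).map Prod.fst) :
    pvSeq l ik nk nv = l.filter (fun kv => !(kv.1 = nk : Bool)) := by
  induction l with
  | nil => rfl
  | cons kv rest ih =>
    by_cases h1 : kv.1 = nk
    · rw [List.filter_cons_of_neg (by simp [h1])] at h ⊢
      rw [pvSeq_cons_nk kv rest ik nk nv h1]
      exact ih h
    · rw [List.filter_cons_of_pos (by simp [h1])] at h ⊢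
      rw [List.map_cons] at h
      have h2 : ¬ kv.1 = ik := fun he => h (List.mem_cons.mpr (Or.inl he.symm))
      have h' : ik ∉ (rest.filter (fun kv => !(kv.1 = nk : Bool))).map Prod.fst :=
        fun hm => h (List.mem_cons.mpr (Or.inr hm))
      rw [pvSeq_cons_other kv rest ik nk nv h1 h2, ih h']

-- main list-level lemma: B's filter + index + splice produces exactly pvSeq
theorem pvSplice_eq_seq (dic : List (String × String)) (ik nk nv : String)
    (hnd : (dic.map Prod.fst).Nodup) :
    (match PySem.List.index? ((dic.filter (fun kv => !(kv.1 = nk : Bool))).map Prod.fst) ik with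
     | some idx => PySem.List.insert (dic.filter (fun kv => !(kv.1 = nk : Bool))) ((idx : Int) + 1) (nk, nv)
     | none => dic.filter (fun kv => !(kv.1 = nk : Bool)))
    = pvSeq dic ik nk nv := by
  induction dic with
  | nil => simp [pvSeq, PySem.List.index?]
  | cons kv rest ih =>
    rw [List.map_cons, List.nodup_cons] at hnd
    have hnd' : (rest.map Prod.fst).Nodup := hnd.2
    have hknr : kv.1 ∉ rest.map Prod.fst := hnd.1
    by_cases h1 : kv.1 = nk
    · rw [List.filter_cons_of_neg (by simp [h1]), pvSeq_cons_nk kv rest ik nk nv h1]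
      exact ih hnd'
    · rw [List.filter_cons_of_pos (by simp [h1]), List.map_cons]
      by_cases h2 : kv.1 = ik
      · -- head is insert_key: index 0, splice at position 1
        have hrest : ik ∉ (rest.filter (fun kv => !(kv.1 = nk : Bool))).map Prod.fst := by
          intro hm
          obtain ⟨p, hp, hpe⟩ := List.mem_map.mp hm
          apply hknr
          rw [h2, ← hpe]
          exact List.mem_map_of_mem (List.mem_of_mem_filter hp)
        rw [h2, PySem.List.index?_cons_self]
        show PySem.List.insert _ (((0 : Nat) : Int) + 1) (nk, nv) = pvSeq (kv :: rest) ik nk nv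
        rw [show ((0 : Nat) : Int) + 1 = ((1 : Nat) : Int) by norm_num]
        rw [PySem.List.insert_natCast _ 1 _ (by simp)]
        rw [pvSeq_cons_ik kv rest ik nk nv h1 h2, pvSeq_no_ik rest ik nk nv hrest]
        simp
      · -- head is an ordinary key
        have ihr := ih hnd'
        rw [PySem.List.index?_cons_of_ne _ (fun he => h2 he)]
        cases hidx : PySem.List.index? ((rest.filter (fun kv => !(kv.1 = nk : Bool))).map Prod.fst) ik with
        | none =>
          simp only [Option.map_none]
          simp only [hidx] at ihr
          rw [pvSeq_cons_other kv rest ik nk nv h1 h2, ← ihr]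
        | some i =>
          simp only [Option.map_some]
          simp only [hidx] at ihr
          obtain ⟨hk, -, -⟩ := PySem.List.getElem_of_index?_eq_some hidx
          have hlen : i < (rest.filter (fun kv => !(kv.1 = nk : Bool))).length := by
            simpa using hk
          rw [show ((i + 1 : Nat) : Int) + 1 = ((i + 1 + 1 : Nat) : Int) by push_cast; ring]
          rw [PySem.List.insert_natCast _ (i + 1 + 1) _ (by simp; omega)]
          rw [show ((i : Nat) : Int) + 1 = ((i + 1 : Nat) : Int) by push_cast; ring] at ihr
          rw [PySem.List.insert_natCast _ (i + 1) _ (by omega)] at ihr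
          rw [List.take_succ_cons, List.drop_succ_cons, List.cons_append,
            pvSeq_cons_other kv rest ik nk nv h1 h2, ihr]

-- ===== VERDICT (by name: the statement is the Claim_ definition above) =====
theorem insert_after_key_spec : Claim_equal_insert_after_key := by
  intro dic ik nk nv _ hpre
  show insert_after_key dic ik nk nv = insert_after_key_alt dic ik nk nv
  unfold insert_after_key insert_after_key_alt
  rw [pvFoldA, ← pvSplice_eq_seq dic ik nk nv hpre]
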